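-- pv_equiv track=rewrite | github.com/aspuru-guzik-group/selfies | selfies_fcts.py | _make_brackets_around_atoms
-- ===== SOURCE A (Python) =====
-- def _make_brackets_around_atoms(smiles): # first function in the encoder: All atoms are itemized via brackets.
--                                         # for example: C1=CO1O -> [C]1[=C][O][O].
--                                         # Meaning that bond information is treated as part of the atom, to ensure semantical validity
--                                         # Brackets define an element of the alphabet, and for each of them there is a rule vector in the grammar.
--     ii=0
--     smiles=smiles.replace(' ','')
--     current_new_smiles=''
--     while ii<len(smiles):
--         if smiles[ii]=='[':
--             small_smiles=smiles[ii:]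
--             closing_bracket=small_smiles.find(']')
--             in_bracket_content=small_smiles[0:closing_bracket+1]
--             current_new_smiles+=in_bracket_content
--             ii+=len(in_bracket_content)
--
--         elif (smiles[ii]>='A' and smiles[ii]<='Z') or (smiles[ii]>='a' and smiles[ii]<='z') or smiles[ii]=='*':
--             smiles=smiles+' '
--             if smiles[ii:ii+2]=='Br' or smiles[ii:ii+2]=='Cl':
--                 current_new_smiles+='['+smiles[ii:ii+2]+']'
--                 ii+=2
--             else:
--                 current_new_smiles+='['+smiles[ii:ii+1]+']'
--                 ii+=1
--             smiles=smiles.replace(' ','')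
--         elif smiles[ii]=='(' or smiles[ii]==')' or smiles[ii]=='.' or smiles[ii]=='%' or (smiles[ii]>='0' and smiles[ii]<='9'): # these symbols, for rings, brackets and divisions between molecules, will be outside the brackets
--             current_new_smiles+=smiles[ii]
--             ii+=1
--         elif smiles[ii]=='=' or smiles[ii]=='#' or smiles[ii]=='\\' or smiles[ii]=='/' or smiles[ii]=='-': # these symbols will be part of the brackets. The sterochemical information could potentially be outside the bracket, by introducing a new rule vector for them. What is more advantageos need to be investigated later.
--             pre_symbol=smiles[ii]
--             ii+=1
--             if smiles[ii]=='[':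
--                 small_smiles=smiles[ii:]
--                 closing_bracket=small_smiles.find(']')
--                 in_bracket_content=small_smiles[1:closing_bracket]
--                 current_new_smiles+='['+pre_symbol+in_bracket_content+']'
--                 ii+=len(in_bracket_content)+2
--             elif (smiles[ii]>='A' and smiles[ii]<='Z') or (smiles[ii]>='a' and smiles[ii]<='z')  or smiles[ii]=='*': # upper and lower case letters, as well as the wildcard symbol is part of the bracket.
--                 smiles=smiles+' '
--                 if smiles[ii:ii+2]=='Br' or smiles[ii:ii+2]=='Cl':      # Chlor and Brom are usually written without brackets in SMILES strings, so need to be treated differently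
--                     current_new_smiles+='['+pre_symbol+smiles[ii:ii+2]+']'
--                     ii+=2
--                 else:
--                     current_new_smiles+='['+pre_symbol+smiles[ii:ii+1]+']'   # Add brackets around element
--                     ii+=1
--                 smiles=smiles.replace(' ','')
--             elif smiles[ii]=='%' or (smiles[ii]>='0' and smiles[ii]<='9'): # explicit bond-number with ring
--                 current_new_smiles+=pre_symbol+smiles[ii]
--                 ii+=1
--             else:
--                 raise ValueError('_make_brackets_around_atoms: Unknown symbol in the string.')
--
--         else:
--             raise ValueError('_make_brackets_around_atoms: Unknown symbol in the string.')
--     return current_new_smiles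
-- ===== SOURCE B (Python) =====
-- import re
--
-- # Regex tokenizer: one compiled alternation replaces A's manual index-advancing
-- # state machine; pieces are collected in a list and joined at the end.
-- _TOKEN = re.compile(
--     r"(?P<bracket>\[[^\]]*\])"
--     r"|(?P<bond>[=#\\/-])?(?P<atom>Br|Cl|[A-Za-z*]|\[[^\]]*\])"
--     r"|(?P<rbond>[=#\\/-])(?P<ring>[%0-9])"
--     r"|(?P<plain>[().%0-9])"
-- )
--
-- def _make_brackets_around_atoms(smiles):
--     smiles = smiles.replace(' ', '')
--     pieces = []
--     pos = 0
--     while pos < len(smiles):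
--         m = _TOKEN.match(smiles, pos)
--         if m is None:
--             raise ValueError('_make_brackets_around_atoms: Unknown symbol in the string.')
--         if m.group('bracket') is not None:
--             pieces.append(m.group('bracket'))
--         elif m.group('atom') is not None:
--             bond = m.group('bond') or ''
--             atom = m.group('atom')
--             if atom.startswith('['):
--                 pieces.append('[' + bond + atom[1:-1] + ']')
--             else:
--                 pieces.append('[' + bond + atom + ']')
--         elif m.group('ring') is not None:
--             pieces.append(m.group('rbond') + m.group('ring'))
--         else:
--             pieces.append(m.group('plain'))
--         pos = m.end()
--     return ''.join(pieces)
-- ===== Notes on version B (the rewrite author's own statement) =====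
-- stated objective: idiomatic
-- what changed: Replaced A's manual index-advancing state machine (with its in-place string padding tricks) by a compiled-regex tokenizer: one alternation matched repeatedly at the current position, emitted pieces collected in a list and joined.
-- outside the precondition, e.g. on _make_brackets_around_atoms('=[ab'): A returns '[=a]', B raises ValueError
import Mathlib
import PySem

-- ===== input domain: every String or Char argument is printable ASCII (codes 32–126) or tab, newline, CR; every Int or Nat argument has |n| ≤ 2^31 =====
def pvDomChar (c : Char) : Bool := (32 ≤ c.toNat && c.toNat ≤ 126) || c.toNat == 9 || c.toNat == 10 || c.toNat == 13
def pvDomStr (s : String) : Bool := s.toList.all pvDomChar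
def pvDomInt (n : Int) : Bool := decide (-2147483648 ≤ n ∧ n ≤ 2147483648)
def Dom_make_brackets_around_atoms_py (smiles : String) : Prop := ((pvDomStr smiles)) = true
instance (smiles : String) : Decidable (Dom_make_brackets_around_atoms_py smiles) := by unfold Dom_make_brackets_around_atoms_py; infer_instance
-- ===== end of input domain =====

-- B replaces A's manual index-advancing state machine with a regex tokenizer (one compiled
-- alternation matched repeatedly; pieces collected in a list and joined) — objective: idiomatic.
-- On malformed input where A raises (trailing bond, stray symbol) or loops forever (unmatched
-- '['), B raises ValueError; such inputs are outside Pre_ (see the Pre_ comment).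

-- ===== PORT A =====
-- A's while-loop, transliterated as recursion on the remaining suffix smiles[ii:] (every
-- access in A is at an offset from ii); fuel bounds the iteration count because Python's
-- loop does not advance ii on an unmatched '[' (it diverges there — outside Pre_).
-- A's temporary trailing-' ' padding and the smiles.replace(' ','') round-trip are modelled
-- by the 2-char take on the unpadded suffix: Python's 'X ' compares unequal to 'Br'/'Cl'
-- exactly as the 1-element take does.
def pvAgo : Nat → List Char → List Char → List Char
  | 0, _, acc => acc
  | fuel+1, s, acc =>
    match s with
    | [] => acc
    | c :: rest =>
      if c = '[' then
        let closing := PySem.Chars.find s [']']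
        let content := PySem.List.slice s (some 0) (some (closing+1))
        pvAgo fuel (s.drop content.length) (acc ++ content)
      else if ('A' ≤ c && c ≤ 'Z') || ('a' ≤ c && c ≤ 'z') || c = '*' then
        if s.take 2 = ['B','r'] || s.take 2 = ['C','l'] then
          pvAgo fuel (s.drop 2) (acc ++ '[' :: s.take 2 ++ [']'])
        else
          pvAgo fuel (s.drop 1) (acc ++ '[' :: s.take 1 ++ [']'])
      else if c = '(' || c = ')' || c = '.' || c = '%' || ('0' ≤ c && c ≤ '9') then
        pvAgo fuel rest (acc ++ [c])
      else if c = '=' || c = '#' || c = '\\' || c = '/' || c = '-' then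
        match rest with
        | [] => acc   -- Python: IndexError here (outside Pre_)
        | d :: r2 =>
          if d = '[' then
            let closing := PySem.Chars.find rest [']']
            let content := PySem.List.slice rest (some 1) (some closing)
            pvAgo fuel (rest.drop (content.length + 2)) (acc ++ '[' :: c :: (content ++ [']']))
          else if ('A' ≤ d && d ≤ 'Z') || ('a' ≤ d && d ≤ 'z') || d = '*' then
            if rest.take 2 = ['B','r'] || rest.take 2 = ['C','l'] then
              pvAgo fuel (rest.drop 2) (acc ++ '[' :: c :: (rest.take 2 ++ [']']))
            else
              pvAgo fuel (rest.drop 1) (acc ++ '[' :: c :: (rest.take 1 ++ [']']))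
          else if d = '%' || ('0' ≤ d && d ≤ '9') then
            pvAgo fuel r2 (acc ++ [c, d])
          else acc   -- Python: raise ValueError (outside Pre_)
      else acc       -- Python: raise ValueError (outside Pre_)

def make_brackets_around_atoms_py (smiles : String) : String :=
  let s := smiles.toList.filter (fun c => c ≠ ' ')
  String.ofList (pvAgo (s.length + 1) s [])

-- ===== PORT B =====
-- Transliteration of Source B: the compiled regex alternation is ported as a hand-written
-- matcher (exact for this pattern, alternatives tried in the regex's priority order with
-- its backtracking on the optional bond prefix); the loop collects pieces and joins them.

-- regex atom \[[^\]]*\] at the head of s: (whole match, rest)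
def pvBracketGroup? : List Char → Option (List Char × List Char)
  | '[' :: t =>
    match t.drop (t.takeWhile (· ≠ ']')).length with
    | ']' :: r => some ('[' :: (t.takeWhile (· ≠ ']') ++ [']']), r)
    | _ => none
  | _ => none

def pvIsBond (c : Char) : Bool := c = '=' || c = '#' || c = '\\' || c = '/' || c = '-'
def pvIsRing (c : Char) : Bool := c = '%' || ('0' ≤ c && c ≤ '9')

-- regex group (?P<atom>Br|Cl|[A-Za-z*]|\[[^\]]*\])
def pvAtom? : List Char → Option (List Char × List Char)
  | 'B' :: 'r' :: r => some (['B','r'], r)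
  | 'C' :: 'l' :: r => some (['C','l'], r)
  | c :: r =>
    if ('A' ≤ c && c ≤ 'Z') || ('a' ≤ c && c ≤ 'z') || c = '*' then some ([c], r)
    else pvBracketGroup? (c :: r)
  | [] => none

-- '[' + bond + atom[1:-1] + ']'  resp.  '[' + bond + atom + ']'
def pvRenderAtom (bond : List Char) (atom : List Char) : List Char :=
  match atom with
  | '[' :: _ => '[' :: (bond ++ (atom.drop 1).dropLast ++ [']'])
  | _ => '[' :: (bond ++ atom ++ [']'])

-- one regex match at the head of s: (emitted piece, rest); none = no match (ValueError in Source B)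
def pvTok? (s : List Char) : Option (List Char × List Char) :=
  match pvBracketGroup? s with
  | some (g, r) => some (g, r)
  | none =>
    match s with
    | [] => none
    | c :: rest =>
      if pvIsBond c then
        match pvAtom? rest with
        | some (a, r) => some (pvRenderAtom [c] a, r)
        | none =>
          match rest with
          | d :: r2 => if pvIsRing d then some ([c, d], r2) else none
          | [] => none
      else
        match pvAtom? (c :: rest) with
        | some (a, r) => some (pvRenderAtom [] a, r)
        | none =>
          if c = '(' || c = ')' || c = '.' || pvIsRing c then some ([c], rest) else none

-- fuel = remaining length: each regex match consumes at least one character, so the while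
-- loop of Source B runs at most s.length times (the 0-fuel case is unreachable under Pre_).
def pvBPieces : Nat → List Char → List (List Char)
  | _, [] => []
  | 0, _ :: _ => []
  | fuel+1, c :: rest =>
    match pvTok? (c :: rest) with
    | some (p, r) => p :: pvBPieces fuel r
    | none => []    -- Source B raises ValueError on leftover unmatched input (outside Pre_)

def make_brackets_around_atoms_py_alt (smiles : String) : String :=
  let s := smiles.toList.filter (fun c => c ≠ ' ')
  String.ofList (pvBPieces s.length s).flatten

-- ===== PRECONDITION & SPEC =====
-- Pre_: after space removal, the string is a concatenation of well-formed SMILES tokens: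
-- a bracket group '[...]', an optional bond symbol followed by an atom (Br, Cl, a letter,
-- '*' or a bracket group), a bond symbol followed by a ring digit/'%', or a bare
-- structural symbol ( ) . % digit.  Outside this grammar A raises ValueError/IndexError
-- or loops forever on an unmatched '[' — except that after a bond symbol A still RETURNS
-- on an unmatched '[' (e.g. '=[ab'), an accidental value of its negative-index slicing
-- that Pre_ excludes because B's tokenizer naturally raises ValueError there.
-- Validity is checked by a single left-to-right scan with three states: outside any token
-- (normal), inside a '[...]' group (inBracket), and immediately after a bond symbol
-- (afterBond); the string is valid iff the scan ends in state normal.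
inductive PvScanState where
  | normal
  | afterBond
  | inBracket
deriving DecidableEq, Repr

def pvPreLetter (c : Char) : Bool := ('A' ≤ c && c ≤ 'Z') || ('a' ≤ c && c ≤ 'z') || c = '*'
def pvPreBond (c : Char) : Bool := c = '=' || c = '#' || c = '\\' || c = '/' || c = '-'
def pvPreRing (c : Char) : Bool := c = '%' || ('0' ≤ c && c ≤ '9')

def pvScan : PvScanState → List Char → Bool
  | .normal, [] => true
  | .afterBond, [] => false
  | .inBracket, [] => false
  | .inBracket, c :: rest => if c = ']' then pvScan .normal rest else pvScan .inBracket rest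
  | .normal, c :: rest =>
      if c = '[' then pvScan .inBracket rest
      else if pvPreLetter c then pvScan .normal rest
      else if c = '(' || c = ')' || c = '.' || pvPreRing c then pvScan .normal rest
      else if pvPreBond c then pvScan .afterBond rest
      else false
  | .afterBond, c :: rest =>
      if c = '[' then pvScan .inBracket rest
      else if pvPreLetter c then pvScan .normal rest
      else if pvPreRing c then pvScan .normal rest
      else false

def Pre_make_brackets_around_atoms_py (smiles : String) : Prop :=
  pvScan .normal (smiles.toList.filter (fun c => c ≠ ' ')) = true
instance (smiles : String) : Decidable (Pre_make_brackets_around_atoms_py smiles) := by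
  unfold Pre_make_brackets_around_atoms_py; infer_instance

def pvWitness_make_brackets_around_atoms_py : String := "O=C(O)c1cc[13CH2]cc1Br.%12=Cl"

def Spec_make_brackets_around_atoms_py (smiles : String) (out : String) : Prop := out = make_brackets_around_atoms_py_alt smiles
instance (smiles : String) (out : String) : Decidable (Spec_make_brackets_around_atoms_py smiles out) := by unfold Spec_make_brackets_around_atoms_py; infer_instance

-- ===== CLAIM (what is proved, stated in full; the proofs are below) =====
def Claim_equal_make_brackets_around_atoms_py : Prop := ∀ (smiles : String), Dom_make_brackets_around_atoms_py smiles → Pre_make_brackets_around_atoms_py smiles → Spec_make_brackets_around_atoms_py smiles (make_brackets_around_atoms_py smiles)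

-- ===== LEMMAS AND PROOFS =====

def pvSkipBracket : List Char → Option (List Char)
  | '[' :: t =>
    (match t.dropWhile (· ≠ ']') with
     | ']' :: r => some r
     | _ => none)
  | _ => none

def pvSkipAtom : List Char → Option (List Char)
  | 'B' :: 'r' :: r => some r
  | 'C' :: 'l' :: r => some r
  | c :: r =>
    if ('A' ≤ c && c ≤ 'Z') || ('a' ≤ c && c ≤ 'z') || c = '*' then some r
    else pvSkipBracket (c :: r)
  | [] => none

def pvSkipTok (s : List Char) : Option (List Char) :=
  match pvSkipBracket s with
  | some r => some r
  | none =>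
    match s with
    | [] => none
    | c :: rest =>
      if pvIsBond c then
        match pvSkipAtom rest with
        | some r => some r
        | none =>
          match rest with
          | d :: r2 => if pvIsRing d then some r2 else none
          | [] => none
      else
        match pvSkipAtom (c :: rest) with
        | some r => some r
        | none =>
          if c = '(' || c = ')' || c = '.' || pvIsRing c then some rest else none

theorem pvSkipBracket_length {s r : List Char} (h : pvSkipBracket s = some r) :
    r.length < s.length := by
  unfold pvSkipBracket at h
  split at h
  · rename_i t
    split at h
    · rename_i r' heq
      cases h
      have hd : (']' :: r).length ≤ t.length := heq ▸ List.length_dropWhile_le _ _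
      simp at hd
      simp
      omega
    · exact absurd h (by simp)
  · exact absurd h (by simp)

theorem pvSkipAtom_length {s r : List Char} (h : pvSkipAtom s = some r) :
    r.length < s.length := by
  unfold pvSkipAtom at h
  split at h
  · cases h; simp
  · cases h; simp
  · rename_i c t _ _
    split at h
    · cases h; simp
    · exact pvSkipBracket_length h
  · exact absurd h (by simp)

theorem pvSkipTok_length {s r : List Char} (h : pvSkipTok s = some r) :
    r.length < s.length := by
  unfold pvSkipTok at h
  split at h
  · rename_i r' heq
    cases h
    exact pvSkipBracket_length heq
  · split at h
    · exact absurd h (by simp)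
    · rename_i c rest
      split at h
      · split at h
        · rename_i r' heq
          cases h
          have := pvSkipAtom_length heq
          simp; omega
        · split at h
          · split at h
            · cases h; simp
            · exact absurd h (by simp)
          · exact absurd h (by simp)
      · split at h
        · rename_i r' heq
          cases h
          exact pvSkipAtom_length heq
        · split at h
          · cases h; simp
          · exact absurd h (by simp)



theorem singleton_prefix (a : Char) (l : List Char) : [a] <+: l ↔ l.head? = some a := by
  cases l with
  | nil => simp
  | cons b t => simp [List.cons_prefix_cons, eq_comm]

theorem tw_decomp (a : Char) (pre suf : List Char) (hpre : ∀ c ∈ pre, c ≠ a) :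
    (pre ++ a :: suf).takeWhile (· ≠ a) = pre ∧ (pre ++ a :: suf).dropWhile (· ≠ a) = a :: suf := by
  induction pre with
  | nil => simp
  | cons b t ih =>
    have hb : b ≠ a := hpre b (by simp)
    have := ih (fun c hc => hpre c (by simp [hc]))
    rw [List.cons_append, List.takeWhile_cons, List.dropWhile_cons]
    simpa [hb] using this

theorem find_singleton_append (a : Char) (pre suf : List Char) (hpre : ∀ c ∈ pre, c ≠ a) :
    PySem.Chars.find (pre ++ a :: suf) [a] = (pre.length : Int) := by
  set s := pre ++ a :: suf with hs
  have hinf : [a] <:+: s := by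
    have h1 : [a] <+: a :: suf := by rw [singleton_prefix]; rfl
    exact h1.isInfix.trans (List.suffix_append pre (a :: suf)).isInfix
  have hge : 0 ≤ PySem.Chars.find s [a] := (PySem.Chars.find_nonneg_iff _ _).2 hinf
  obtain ⟨hpref, hmin⟩ := PySem.Chars.find_spec (s := s) (sub := [a]) hge
  have hat : [a] <+: s.drop pre.length := by
    rw [hs, List.drop_left, singleton_prefix]; rfl
  have hle : (PySem.Chars.find s [a]).toNat ≤ pre.length := by
    by_contra hlt
    exact absurd hat (hmin _ (by omega))
  have hnotlt : ¬ (PySem.Chars.find s [a]).toNat < pre.length := by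
    intro hlt
    have hh := hpref
    rw [singleton_prefix, List.head?_drop] at hh
    rw [hs, List.getElem?_append_left (by omega)] at hh
    have hg : pre[(PySem.Chars.find s [a]).toNat]'(by omega) = a := by
      have he := List.getElem?_eq_getElem (l := pre) (i := (PySem.Chars.find s [a]).toNat) (by omega)
      rw [he] at hh; exact Option.some.inj hh
    exact hpre _ (hg ▸ List.getElem_mem _) rfl
  omega

theorem skipBracket_shape {s r : List Char} (h : pvSkipBracket s = some r) :
    ∃ tw, (∀ c ∈ tw, c ≠ ']') ∧ s = '[' :: (tw ++ ']' :: r) := by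
  unfold pvSkipBracket at h
  split at h
  · rename_i t
    split at h
    · rename_i r' heq
      cases h
      refine ⟨t.takeWhile (· ≠ ']'), fun c hc => ?_, ?_⟩
      · have := List.mem_takeWhile_imp hc
        simpa using this
      · have := List.takeWhile_append_dropWhile (p := (· ≠ ']')) (l := t)
        rw [heq] at this
        exact congrArg (fun l => '[' :: l) this.symm
    · exact absurd h (by simp)
  · exact absurd h (by simp)

theorem drop_takeWhile_length (p : Char → Bool) (t : List Char) :
    t.drop (t.takeWhile p).length = t.dropWhile p := by
  induction t with
  | nil => simp
  | cons b u ih =>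
    rw [List.takeWhile_cons, List.dropWhile_cons]
    by_cases hb : p b = true
    · simpa [hb] using ih
    · simp [hb]

theorem skipBracket_none {s : List Char} (h : pvSkipBracket s = none) :
    pvBracketGroup? s = none := by
  unfold pvSkipBracket at h
  unfold pvBracketGroup?
  split at h
  · rename_i t
    split at h
    · exact absurd h (by simp)
    · rename_i hne
      split
      · rename_i r heq
        rw [drop_takeWhile_length] at heq
        exact absurd heq (hne _)
      · rfl
  · rfl

theorem skipAtom_none {s : List Char} (h : pvSkipAtom s = none) :
    pvAtom? s = none := by
  unfold pvSkipAtom at h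
  unfold pvAtom?
  split at h
  · exact absurd h (by simp)
  · exact absurd h (by simp)
  · split at h
    · exact absurd h (by simp)
    · rename_i hq
      rw [if_neg hq]
      exact skipBracket_none h
  · rfl

theorem skipAtom_some_cases {t r' : List Char} (h : pvSkipAtom t = some r') :
    (t = 'B'::'r'::r') ∨ (t = 'C'::'l'::r') ∨
    (∃ c', t = c'::r' ∧ (('A' ≤ c' && c' ≤ 'Z') || ('a' ≤ c' && c' ≤ 'z') || c' = '*') = true
        ∧ (∀ x, t ≠ 'B'::'r'::x) ∧ (∀ x, t ≠ 'C'::'l'::x)) ∨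
    (∃ tw, (∀ c ∈ tw, c ≠ ']') ∧ t = '['::(tw++']'::r')) := by
  unfold pvSkipAtom at h
  split at h
  · cases h; exact Or.inl rfl
  · cases h; exact Or.inr (Or.inl rfl)
  · rename_i c t0 hne1 hne2
    split at h
    · rename_i hlet
      cases h
      refine Or.inr (Or.inr (Or.inl ⟨c, rfl, hlet, ?_, ?_⟩))
      · intro x hx
        injection hx with h1 h2
        exact hne1 x h1 h2
      · intro x hx
        injection hx with h1 h2
        exact hne2 x h1 h2
    · rename_i hlet
      obtain ⟨tw, hpre, hs⟩ := skipBracket_shape h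
      exact Or.inr (Or.inr (Or.inr ⟨tw, hpre, hs⟩))
  · exact absurd h (by simp)

theorem bracketGroup_pos {tw r : List Char} (hpre : ∀ c ∈ tw, c ≠ ']') :
    pvBracketGroup? ('[' :: (tw ++ ']' :: r)) = some ('[' :: (tw ++ [']']), r) := by
  unfold pvBracketGroup?
  simp only [(tw_decomp ']' tw r hpre).1, List.drop_left]

theorem letter_not_lbrack (c : Char)
    (h : (('A' ≤ c && c ≤ 'Z') || ('a' ≤ c && c ≤ 'z') || c = '*') = true) : c ≠ '[' := by
  rintro rfl
  simp only [Bool.or_eq_true, Bool.and_eq_true, decide_eq_true_eq, Char.le_def,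
    UInt32.le_iff_toNat_le] at h
  simp at h

theorem plain_not_lbrack (c : Char)
    (h : (c = '(' || c = ')' || c = '.' || pvIsRing c) = true) : c ≠ '[' := by
  rintro rfl
  exact absurd h (by decide)

theorem plain_not_letter (c : Char)
    (h : (c = '(' || c = ')' || c = '.' || pvIsRing c) = true) :
    (('A' ≤ c && c ≤ 'Z') || ('a' ≤ c && c ≤ 'z') || c = '*') = false := by
  simp only [pvIsRing, Bool.or_eq_true, decide_eq_true_eq, Bool.and_eq_true, Char.le_def,
    UInt32.le_iff_toNat_le, Bool.or_eq_false_iff, Bool.and_eq_false_iff,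
    decide_eq_false_iff_not, Char.ext_iff, ← UInt32.toNat_inj] at *
  simp at *
  omega

theorem plain_structural (c : Char)
    (h : (c = '(' || c = ')' || c = '.' || pvIsRing c) = true) :
    (c = '(' || c = ')' || c = '.' || c = '%' || ('0' ≤ c && c ≤ '9')) = true := by
  simp only [pvIsRing] at h
  simp only [Bool.or_eq_true] at *
  tauto

theorem ring_not_lbrack (c : Char) (h : pvIsRing c = true) : c ≠ '[' := by
  rintro rfl
  exact absurd h (by decide)

theorem ring_not_letter (c : Char) (h : pvIsRing c = true) :
    (('A' ≤ c && c ≤ 'Z') || ('a' ≤ c && c ≤ 'z') || c = '*') = false := by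
  have := plain_not_letter c (by simp [h])
  exact this

theorem take2_ne_Br {c' : Char} {r : List Char} (hne : ∀ x, c' :: r ≠ 'B' :: 'r' :: x) :
    (c' :: r).take 2 ≠ ['B', 'r'] := by
  cases r with
  | nil => intro heq; have := congrArg List.length heq; simp at this
  | cons e r2 =>
    intro heq
    have heq2 : ([c', e] : List Char) = ['B', 'r'] := by
      simpa [List.take_succ_cons] using heq
    injection heq2 with h1 h2
    injection h2 with h3 h4
    exact hne r2 (by rw [h1, h3])

theorem take2_ne_Cl {c' : Char} {r : List Char} (hne : ∀ x, c' :: r ≠ 'C' :: 'l' :: x) :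
    (c' :: r).take 2 ≠ ['C', 'l'] := by
  cases r with
  | nil => intro heq; have := congrArg List.length heq; simp at this
  | cons e r2 =>
    intro heq
    have heq2 : ([c', e] : List Char) = ['C', 'l'] := by
      simpa [List.take_succ_cons] using heq
    injection heq2 with h1 h2
    injection h2 with h3 h4
    exact hne r2 (by rw [h1, h3])

theorem render_single (bond : List Char) (c' : Char) (h : c' ≠ '[') :
    pvRenderAtom bond [c'] = '[' :: (bond ++ [c'] ++ [']']) := by
  unfold pvRenderAtom
  split
  · rename_i heq
    injection heq with h1 _
    exact (h h1).elim
  · rfl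

theorem atom_pos_letter {c' : Char} {r : List Char}
    (hlet : (('A' ≤ c' && c' ≤ 'Z') || ('a' ≤ c' && c' ≤ 'z') || c' = '*') = true)
    (hne1 : ∀ x, c' :: r ≠ 'B' :: 'r' :: x) (hne2 : ∀ x, c' :: r ≠ 'C' :: 'l' :: x) :
    pvAtom? (c' :: r) = some ([c'], r) := by
  unfold pvAtom?
  split
  · rename_i x heq
    exact absurd heq (hne1 x)
  · rename_i x heq
    exact absurd heq (hne2 x)
  · rename_i c2 r2 _ _ heq
    injection heq with h1 h2
    subst h1; subst h2
    rw [if_pos hlet]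
  · rename_i heq
    exact absurd heq (by simp)

theorem atom_pos_bracket {tw r : List Char} (hpre : ∀ c ∈ tw, c ≠ ']') :
    pvAtom? ('[' :: (tw ++ ']' :: r)) = some ('[' :: (tw ++ [']']), r) := by
  unfold pvAtom?
  split
  · rename_i x heq
    injection heq with h1 _
    exact absurd h1 (by decide)
  · rename_i x heq
    injection heq with h1 _
    exact absurd h1 (by decide)
  · rename_i c2 r2 _ _ heq
    injection heq with h1 h2
    subst h1; subst h2
    rw [if_neg (by decide)]
    exact bracketGroup_pos hpre
  · rename_i heq
    exact absurd heq (by simp)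

theorem pvStep {s r : List Char} (h : pvSkipTok s = some r) :
    ∃ p, pvTok? s = some (p, r) ∧
      ∀ fuel acc, pvAgo (fuel+1) s acc = pvAgo fuel r (acc ++ p) := by
  unfold pvSkipTok at h
  split at h
  · rename_i r' heqB
    cases h
    obtain ⟨tw, hpre, hs⟩ := skipBracket_shape heqB
    subst hs
    refine ⟨'[' :: (tw ++ [']']), ?_, ?_⟩
    · unfold pvTok?
      rw [bracketGroup_pos hpre]
    · intro fuel acc
      have hfind : PySem.Chars.find ('[' :: (tw ++ ']' :: r)) [']'] = ((tw.length + 1 : Nat) : Int) := by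
        have hx := find_singleton_append ']' ('[' :: tw) r
          (by intro c hc; rcases List.mem_cons.1 hc with rfl | hc2; exacts [by decide, hpre c hc2])
        simpa using hx
      have hcontent : PySem.List.slice ('[' :: (tw ++ ']' :: r)) (some 0) (some (((tw.length + 1 : Nat) : Int) + 1)) = '[' :: (tw ++ [']']) := by
        rw [PySem.List.slice_zero_start, show (((tw.length + 1 : Nat) : Int) + 1) = ((tw.length + 2 : Nat) : Int) by push_cast; ring,
          PySem.List.slice_to_natCast]
        rw [show '[' :: (tw ++ ']' :: r) = ('[' :: (tw ++ [']'])) ++ r by simp]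
        exact List.take_left' (by simp)
      have hdrop : ('[' :: (tw ++ ']' :: r)).drop ('[' :: (tw ++ [']'])).length = r := by
        rw [show '[' :: (tw ++ ']' :: r) = ('[' :: (tw ++ [']'])) ++ r by simp]
        exact List.drop_left
      simp only [pvAgo, hfind, hcontent, hdrop, if_true]
  · rename_i heqB
    have hbg := skipBracket_none heqB
    split at h
    · exact absurd h (by simp)
    · rename_i c rest
      split at h
      · rename_i hbond
        have hc5 : c = '=' ∨ c = '#' ∨ c = '\\' ∨ c = '/' ∨ c = '-' := by
          have := hbond
          simp only [pvIsBond, Bool.or_eq_true, decide_eq_true_eq] at this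
          tauto
        split at h
        · rename_i r1 heqA
          cases h
          rcases skipAtom_some_cases heqA with hsh | hsh | ⟨c', hsh, hlet, hne1, hne2⟩ | ⟨tw, hpre, hsh⟩
          · subst hsh
            refine ⟨['[', c, 'B', 'r', ']'], ?_, fun fuel acc => ?_⟩
            · simp only [pvTok?, hbg]
              rcases hc5 with rfl|rfl|rfl|rfl|rfl <;>
                simp [pvAtom?, pvRenderAtom, pvIsBond]
            · rcases hc5 with rfl|rfl|rfl|rfl|rfl <;> simp [pvAgo]
          · subst hsh
            refine ⟨['[', c, 'C', 'l', ']'], ?_, fun fuel acc => ?_⟩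
            · simp only [pvTok?, hbg]
              rcases hc5 with rfl|rfl|rfl|rfl|rfl <;>
                simp [pvAtom?, pvRenderAtom, pvIsBond]
            · rcases hc5 with rfl|rfl|rfl|rfl|rfl <;> simp [pvAgo]
          · subst hsh
            have hc' : c' ≠ '[' := letter_not_lbrack c' hlet
            have ht1 := take2_ne_Br hne1
            have ht2 := take2_ne_Cl hne2
            refine ⟨['[', c, c', ']'], ?_, fun fuel acc => ?_⟩
            · simp only [pvTok?, hbg]
              rw [atom_pos_letter hlet hne1 hne2]
              rcases hc5 with rfl|rfl|rfl|rfl|rfl <;>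
                simp [pvIsBond, render_single _ _ hc']
            · rcases hc5 with rfl|rfl|rfl|rfl|rfl <;>
                (simp [pvAgo, hc', hlet];
                 rintro (⟨rfl, hq⟩ | ⟨rfl, hq⟩) <;>
                 [exact absurd (by simp [hq]) ht1; exact absurd (by simp [hq]) ht2])
          · subst hsh
            have hfind : PySem.Chars.find ('[' :: (tw ++ ']' :: r)) [']'] = ((tw.length + 1 : Nat) : Int) := by
              have hx := find_singleton_append ']' ('[' :: tw) r
                (by intro x hx; rcases List.mem_cons.1 hx with rfl | hx2; exacts [by decide, hpre x hx2])
              simpa using hx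
            have hsl : PySem.List.slice ('[' :: (tw ++ ']' :: r)) (some 1) (some ((tw.length : Int) + 1)) = tw := by
              rw [show ((tw.length : Int) + 1) = ((tw.length + 1 : Nat) : Int) by push_cast; ring]
              rw [show (some (1:Int)) = some ((1 : Nat) : Int) by norm_num, PySem.List.slice_natCast]
              simp only [List.drop_succ_cons, List.drop_zero, Nat.add_sub_cancel]
              exact List.take_left' rfl
            have hdr : (tw ++ ']' :: r).drop (tw.length + 1) = r := by
              rw [show tw ++ ']' :: r = (tw ++ [']']) ++ r by simp]
              rw [show tw.length + 1 = (tw ++ [']']).length by simp]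
              exact List.drop_left
            refine ⟨'[' :: c :: (tw ++ [']']), ?_, fun fuel acc => ?_⟩
            · simp only [pvTok?, hbg]
              rw [atom_pos_bracket hpre]
              rcases hc5 with rfl|rfl|rfl|rfl|rfl <;>
                simp [pvIsBond, pvRenderAtom]
            · rcases hc5 with rfl|rfl|rfl|rfl|rfl <;>
                simp [pvAgo, hfind, hsl, hdr]
        · rename_i heqA
          have hat := skipAtom_none heqA
          split at h
          · rename_i d r2
            split at h
            · rename_i hring
              cases h
              have hd1 : d ≠ '[' := ring_not_lbrack d hring
              have hd2 := ring_not_letter d hring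
              refine ⟨[c, d], ?_, fun fuel acc => ?_⟩
              · simp only [pvTok?, hbg, hat]
                rcases hc5 with rfl|rfl|rfl|rfl|rfl <;> simp [pvIsBond, hring]
              · have hr' : (d = '%' || ('0' ≤ d && d ≤ '9')) = true := hring
                rcases hc5 with rfl|rfl|rfl|rfl|rfl <;>
                  simp [pvAgo, hd1, hd2, hr']
            · exact absurd h (by simp)
          · exact absurd h (by simp)
      · rename_i hbond
        split at h
        · rename_i r1 heqA
          cases h
          rcases skipAtom_some_cases heqA with hsh | hsh | ⟨c', hsh, hlet, hne1, hne2⟩ | ⟨tw, hpre, hsh⟩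
          · injection hsh with hc hrest
            subst hc; subst hrest
            refine ⟨['[', 'B', 'r', ']'], ?_, fun fuel acc => ?_⟩
            · simp [pvTok?, pvAtom?, pvRenderAtom, pvIsBond, hbg]
            · simp [pvAgo]
          · injection hsh with hc hrest
            subst hc; subst hrest
            refine ⟨['[', 'C', 'l', ']'], ?_, fun fuel acc => ?_⟩
            · simp [pvTok?, pvAtom?, pvRenderAtom, pvIsBond, hbg]
            · simp [pvAgo]
          · injection hsh with hc hrest
            subst hc; subst hrest
            have hc' : c ≠ '[' := letter_not_lbrack c hlet
            have ht1 := take2_ne_Br hne1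
            have ht2 := take2_ne_Cl hne2
            refine ⟨['[', c, ']'], ?_, fun fuel acc => ?_⟩
            · simp only [pvTok?, hbg]
              rw [atom_pos_letter hlet hne1 hne2]
              simp [hbond, render_single _ _ hc']
            · simp [pvAgo, hc', hlet]
              rintro (⟨rfl, hq⟩ | ⟨rfl, hq⟩) <;>
                [exact absurd (by simp [hq]) ht1; exact absurd (by simp [hq]) ht2]
          · -- c :: rest = '[' :: … contradicts pvSkipBracket s = none
            exfalso
            rw [hsh] at heqB
            unfold pvSkipBracket at heqB
            have hdw := (tw_decomp ']' tw r hpre).2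
            simp only [ne_eq, decide_not] at hdw
            simp [hdw] at heqB
        · rename_i heqA
          have hat := skipAtom_none heqA
          split at h
          · rename_i hplain
            cases h
            have hc1 : c ≠ '[' := plain_not_lbrack c hplain
            have hc2 := plain_not_letter c hplain
            have hc3 := plain_structural c hplain
            refine ⟨[c], ?_, fun fuel acc => ?_⟩
            · simp [pvTok?, hbg, hat, hbond, hplain]
            · simp [pvAgo, hc1, hc2, hc3]
          · exact absurd h (by simp)



theorem pvPreRing_eq (c : Char) : pvPreRing c = pvIsRing c := rfl

theorem letter_not_bond (c : Char) (h : pvPreLetter c = true) : pvIsBond c = false := by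
  simp only [pvPreLetter, pvIsBond, Bool.or_eq_true, Bool.and_eq_true, decide_eq_true_eq,
    Char.le_def, UInt32.le_iff_toNat_le, Bool.or_eq_false_iff, decide_eq_false_iff_not,
    Char.ext_iff, ← UInt32.toNat_inj] at *
  simp at *
  omega

theorem plain_not_bond (c : Char) (h : (c = '(' || c = ')' || c = '.' || pvPreRing c) = true) :
    pvIsBond c = false := by
  simp only [pvPreRing, pvIsBond, Bool.or_eq_true, Bool.and_eq_true, decide_eq_true_eq,
    Char.le_def, UInt32.le_iff_toNat_le, Bool.or_eq_false_iff, decide_eq_false_iff_not,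
    Char.ext_iff, ← UInt32.toNat_inj] at *
  simp at *
  omega

theorem skipBracket_pos {tw r : List Char} (hpre : ∀ c ∈ tw, c ≠ ']') :
    pvSkipBracket ('[' :: (tw ++ ']' :: r)) = some r := by
  have hdw := (tw_decomp ']' tw r hpre).2
  simp only [ne_eq, decide_not] at hdw
  unfold pvSkipBracket
  simp [hdw]

theorem skipBracket_notlb {c : Char} {rest : List Char} (hc : c ≠ '[') :
    pvSkipBracket (c :: rest) = none := by
  unfold pvSkipBracket
  split
  · rename_i t heq
    injection heq with h1 _
    exact absurd h1 hc
  · rfl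

theorem skipAtom_none_of {c : Char} {rest : List Char}
    (hnl : pvPreLetter c = false) (hnb : c ≠ '[') : pvSkipAtom (c :: rest) = none := by
  unfold pvSkipAtom
  split
  · rename_i x heq
    injection heq with h1 _
    subst h1
    exact absurd hnl (by decide)
  · rename_i x heq
    injection heq with h1 _
    subst h1
    exact absurd hnl (by decide)
  · rename_i c2 r2 _ _ heq
    injection heq with h1 h2
    subst h1; subst h2
    rw [if_neg (by simp only [pvPreLetter] at hnl; simp [hnl])]
    exact skipBracket_notlb hnb
  · rename_i heq
    exact absurd heq (by simp)

-- after a letter the scan stays in state normal, so whichever of the one- or two-character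
-- atoms pvSkipAtom consumes, the remainder is still accepted from state normal
theorem skipAtom_letter {c : Char} {rest : List Char}
    (hlet : pvPreLetter c = true) (hsc : pvScan .normal rest = true) :
    ∃ r', pvSkipAtom (c :: rest) = some r' ∧ pvScan .normal r' = true := by
  cases rest with
  | nil =>
    refine ⟨[], ?_, rfl⟩
    have hlet' := hlet
    simp only [pvPreLetter] at hlet'
    unfold pvSkipAtom
    simp [hlet']
  | cons d r2 =>
    by_cases hBr : c = 'B' ∧ d = 'r'
    · obtain ⟨rfl, rfl⟩ := hBr
      exact ⟨r2, rfl, by simpa [pvScan, pvPreLetter] using hsc⟩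
    · by_cases hCl : c = 'C' ∧ d = 'l'
      · obtain ⟨rfl, rfl⟩ := hCl
        exact ⟨r2, rfl, by simpa [pvScan, pvPreLetter] using hsc⟩
      · refine ⟨d :: r2, ?_, hsc⟩
        unfold pvSkipAtom
        split
        · rename_i x heq
          injection heq with h1 h2
          injection h2 with h3 _
          exact absurd ⟨h1, h3⟩ hBr
        · rename_i x heq
          injection heq with h1 h2
          injection h2 with h3 _
          exact absurd ⟨h1, h3⟩ hCl
        · rename_i c2 rr _ _ heq
          injection heq with h1 h2
          subst h1; subst h2
          have hlet' := hlet
          simp only [pvPreLetter] at hlet'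
          simp [hlet']
        · rename_i heq
          exact absurd heq (by simp)

theorem scan_bracket {t : List Char} (h : pvScan .inBracket t = true) :
    ∃ tw r, (∀ c ∈ tw, c ≠ ']') ∧ t = tw ++ ']' :: r ∧ pvScan .normal r = true := by
  induction t with
  | nil => simp [pvScan] at h
  | cons c rest ih =>
    by_cases hc : c = ']'
    · subst hc
      exact ⟨[], rest, by simp, rfl, by simpa [pvScan] using h⟩
    · have h2 : pvScan .inBracket rest = true := by simpa [pvScan, hc] using h
      obtain ⟨tw, r, hpre, ht, hr⟩ := ih h2
      refine ⟨c :: tw, r, ?_, by rw [ht]; rfl, hr⟩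
      intro x hx
      rcases List.mem_cons.1 hx with rfl | hx2
      · exact hc
      · exact hpre x hx2

theorem scanStep {s : List Char} (h : pvScan .normal s = true) (hne : s ≠ []) :
    ∃ r, pvSkipTok s = some r ∧ pvScan .normal r = true := by
  cases s with
  | nil => cases hne rfl
  | cons c rest =>
    by_cases hc : c = '['
    · subst hc
      have hib : pvScan .inBracket rest = true := by simpa [pvScan] using h
      obtain ⟨tw, r, hpre, ht, hr⟩ := scan_bracket hib
      subst ht
      refine ⟨r, ?_, hr⟩
      unfold pvSkipTok
      rw [skipBracket_pos hpre]
    · by_cases hlet : pvPreLetter c = true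
      · have hsc : pvScan .normal rest = true := by simpa [pvScan, hc, hlet] using h
        obtain ⟨r', heqA, hr'⟩ := skipAtom_letter hlet hsc
        refine ⟨r', ?_, hr'⟩
        unfold pvSkipTok
        simp [skipBracket_notlb hc, letter_not_bond c hlet, heqA]
      · by_cases hstr : (c = '(' || c = ')' || c = '.' || pvPreRing c) = true
        · have hsc : pvScan .normal rest = true := by
            simpa [pvScan, hc, hlet, hstr] using h
          refine ⟨rest, ?_, hsc⟩
          unfold pvSkipTok
          simp [skipBracket_notlb hc, plain_not_bond c hstr,
            skipAtom_none_of (by simpa using hlet) hc]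
          intro h1 h2 h3
          have := hstr
          simp only [pvPreRing_eq, Bool.or_eq_true, decide_eq_true_eq] at this
          tauto
        · by_cases hbond : pvPreBond c = true
          · have hab : pvScan .afterBond rest = true := by
              simpa [pvScan, hc, hlet, hstr, hbond] using h
            have hbond' : pvIsBond c = true := hbond
            cases rest with
            | nil => simp [pvScan] at hab
            | cons d r2 =>
              by_cases hd : d = '['
              · subst hd
                have hib : pvScan .inBracket r2 = true := by simpa [pvScan] using hab
                obtain ⟨tw, r, hpre, ht, hr⟩ := scan_bracket hib
                subst ht
                refine ⟨r, ?_, hr⟩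
                have hsa : pvSkipAtom ('[' :: (tw ++ ']' :: r)) = some r := by
                  unfold pvSkipAtom
                  simp [skipBracket_pos hpre]
                unfold pvSkipTok
                simp [skipBracket_notlb hc, hbond', hsa]
              · by_cases hdlet : pvPreLetter d = true
                · have hsc : pvScan .normal r2 = true := by
                    simpa [pvScan, hd, hdlet] using hab
                  obtain ⟨r', heqA, hr'⟩ := skipAtom_letter hdlet hsc
                  refine ⟨r', ?_, hr'⟩
                  unfold pvSkipTok
                  simp [skipBracket_notlb hc, hbond', heqA]
                · by_cases hdr : pvPreRing d = true
                  · have hsc : pvScan .normal r2 = true := by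
                      simpa [pvScan, hd, hdlet, hdr] using hab
                    refine ⟨r2, ?_, hsc⟩
                    unfold pvSkipTok
                    simp [skipBracket_notlb hc, hbond',
                      skipAtom_none_of (by simpa using hdlet) hd]
                    simpa [pvPreRing_eq] using hdr
                  · exfalso
                    simp [pvScan, hd, hdlet, hdr] at hab
          · exfalso
            simp [pvScan, hc, hlet, hstr, hbond] at h


theorem pvMain : ∀ fuel (s acc : List Char), pvScan .normal s = true → s.length ≤ fuel →
    pvAgo (fuel+1) s acc = acc ++ (pvBPieces fuel s).flatten := by
  intro fuel
  induction fuel with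
  | zero =>
    intro s acc _ h
    have hs : s = [] := List.eq_nil_of_length_eq_zero (by omega)
    subst hs
    simp [pvAgo, pvBPieces]
  | succ n ih =>
    intro s acc hok hlen
    cases s with
    | nil => simp [pvAgo, pvBPieces]
    | cons c rest =>
      obtain ⟨r, heq, hokr⟩ := scanStep hok (by simp)
      obtain ⟨p, htok, hstep⟩ := pvStep heq
      have hlt := pvSkipTok_length heq
      rw [hstep (n+1) acc]
      rw [ih r (acc ++ p) hokr (by simp only [List.length_cons] at hlt hlen ⊢; omega)]
      simp only [pvBPieces, htok]
      simp

-- ===== VERDICT (by name: the statement is the Claim_ definition above) =====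
theorem make_brackets_around_atoms_py_spec : Claim_equal_make_brackets_around_atoms_py := by
  intro smiles _ hpre
  unfold Spec_make_brackets_around_atoms_py make_brackets_around_atoms_py make_brackets_around_atoms_py_alt
  simp only []
  rw [pvMain (smiles.toList.filter (fun c => c ≠ ' ')).length _ [] hpre (le_refl _)]
  rfl
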